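-- pv_equiv track=rewrite | github.com/deadkey/adventofcode | aoc23/D10/d10.py | replacefirst
-- ===== SOURCE A (Python) =====
-- MAP = {'|': (1, 0, 1, 0),'-': (0, 1, 0, 1), 'L': (1, 1, 0, 0), 'J' : (1, 0, 0, 1), '7' : (0, 0, 1, 1), 'F' : (0, 1, 1, 0), '.': (0, 0, 0, 0)}
--
-- def replacefirst(grid, start):
--     r, c =start
--     right = MAP[grid[r][c+1]]
--     up = MAP[grid[r-1][c]]
--     down = MAP[grid[r+1][c]]
--     left = MAP[grid[r][c-1]]
--     dir = [0, 0, 0, 0]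
--     if up[2] == 1:
--         dir[0] = 1
--     if left[1] == 1:
--         dir[-1] = 1
--     if down[0] == 1:
--         dir[2] = 1
--     if right[-1] == 1:
--         dir[1] = 1
--     for letter, dd in MAP.items():
--         if tuple(dir) == dd:
--             grid[r][c] = letter
--             return grid
--     assert False
-- ===== SOURCE B (Python) =====
-- # Alternative: constraint propagation -- start from the set of all seven pipe letters
-- # and narrow it per direction (intersect with the letters having that connection, or
-- # subtract them), ending with a singleton. Like A, mutates grid in place and returns it.
-- def replacefirst(grid, start):
--     r, c = start
--     cands = {'|', '-', 'L', 'J', '7', 'F', '.'}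
--     for neighbor, gives, needs in (
--         (grid[r - 1][c], {'|', '7', 'F'}, {'|', 'L', 'J'}),   # north
--         (grid[r][c + 1], {'-', 'J', '7'}, {'-', 'L', 'F'}),   # east
--         (grid[r + 1][c], {'|', 'L', 'J'}, {'|', '7', 'F'}),   # south
--         (grid[r][c - 1], {'-', 'L', 'F'}, {'-', 'J', '7'}),   # west
--     ):
--         if neighbor in gives:
--             cands &= needs
--         else:
--             cands -= needs
--     if len(cands) != 1:
--         raise AssertionError
--     grid[r][c] = cands.pop()
--     return grid
-- ===== Notes on version B (the rewrite author's own statement) =====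
-- stated objective: alternative
-- what changed: B replaces A's pattern-encode-then-lookup (decode each neighbour to a 4-bit tuple, build a dir tuple, scan MAP.items() for a match) by constraint propagation: it starts from the set of all seven pipe letters and, for each direction, intersects with or subtracts the letters having that connection, leaving a singleton to assign.
import Mathlib
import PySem

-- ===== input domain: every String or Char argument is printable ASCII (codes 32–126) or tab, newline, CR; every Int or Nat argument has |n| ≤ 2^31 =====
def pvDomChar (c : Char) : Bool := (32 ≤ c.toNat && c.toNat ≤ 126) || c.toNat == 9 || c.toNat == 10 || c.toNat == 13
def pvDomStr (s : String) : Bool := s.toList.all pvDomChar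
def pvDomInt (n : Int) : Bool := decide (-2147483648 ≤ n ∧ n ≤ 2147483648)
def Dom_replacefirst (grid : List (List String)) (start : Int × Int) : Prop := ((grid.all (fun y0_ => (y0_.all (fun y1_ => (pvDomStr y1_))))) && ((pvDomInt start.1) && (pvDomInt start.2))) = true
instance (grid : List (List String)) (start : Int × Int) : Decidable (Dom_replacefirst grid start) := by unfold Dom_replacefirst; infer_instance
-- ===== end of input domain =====

-- B replaces A's pattern-encode-then-lookup (decode four neighbours to bit tuples,
-- build a dir tuple, scan MAP.items()) by constraint propagation: narrow a candidate
-- set of the seven letters per direction until one remains (objective: alternative).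
-- Both Pythons mutate grid[r][c] in place and return the mutated grid; the theorems
-- here are about the returned value.

-- ===== PORT A =====

-- the module constant MAP, as an association list in insertion order
def pvMAP : PySem.Dict String (Int × Int × Int × Int) :=
  PySem.Dict.ofList
  [("|", (1, 0, 1, 0)), ("-", (0, 1, 0, 1)), ("L", (1, 1, 0, 0)), ("J", (1, 0, 0, 1)),
   ("7", (0, 0, 1, 1)), ("F", (0, 1, 1, 0)), (".", (0, 0, 0, 0))]

-- grid[i][j] with Python index semantics (shared by both ports: both Pythons index this way)
def pvCell? (grid : List (List String)) (i j : Int) : Option String :=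
  (PySem.List.pyGet? grid i).bind (fun row => PySem.List.pyGet? row j)

-- grid[r][c] = letter (shared: both Pythons end with this assignment)
def pvSetCell (grid : List (List String)) (r c : Int) (letter : String) : List (List String) :=
  PySem.List.pySetD grid r (PySem.List.pySetD (PySem.List.pyGetD grid r []) c letter)

-- 'for letter, dd in MAP.items(): if tuple(dir) == dd: … return', first match
def pvScan (items : List (String × (Int × Int × Int × Int)))
    (dir : Int × Int × Int × Int) : Option String :=
  match items with
  | [] => none
  | (letter, dd) :: rest => if dir == dd then some letter else pvScan rest dir

-- the pure part of A: the four MAP lookups, the dir list and the items scan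
def pvChooseA (sr su sd sl : String) : Option String :=
  match PySem.Dict.get? pvMAP sr, PySem.Dict.get? pvMAP su,
        PySem.Dict.get? pvMAP sd, PySem.Dict.get? pvMAP sl with
  | some right, some up, some down, some left =>
    -- dir = [0,0,0,0]; the four ifs in A's order (dir[0], dir[-1], dir[2], dir[1])
    let d0 : Int := if up.2.2.1 == 1 then 1 else 0
    let d3 : Int := if left.2.1 == 1 then 1 else 0
    let d2 : Int := if down.1 == 1 then 1 else 0
    let d1 : Int := if right.2.2.2 == 1 then 1 else 0
    pvScan pvMAP.items (d0, d1, d2, d3)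
  | _, _, _, _ => none   -- a MAP lookup raised KeyError (excluded by Pre_)

def replacefirst (grid : List (List String)) (start : Int × Int) : List (List String) :=
  let r := start.1
  let c := start.2
  match pvCell? grid r (c+1), pvCell? grid (r-1) c, pvCell? grid (r+1) c, pvCell? grid r (c-1) with
  | some sr, some su, some sd, some sl =>
    match pvChooseA sr su sd sl with
    | some letter => pvSetCell grid r c letter
    | none => grid        -- 'assert False' (excluded by Pre_)
  | _, _, _, _ => grid    -- IndexError (excluded by Pre_)

-- ===== PORT B =====

-- one loop step of B: 'cands &= needs' if the neighbour connects, else 'cands -= needs'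
def pvStepB (cands : PySem.Set String) (p : String × PySem.Set String × PySem.Set String) :
    PySem.Set String :=
  if p.2.1.contains p.1 then PySem.Set.inter cands p.2.2 else PySem.Set.diff cands p.2.2

-- the pure part of B: narrow the candidate set per direction, then demand a singleton
-- (cands.pop() is deterministic since exactly one element remains; exact here)
def pvChooseB (su sr sd sl : String) : Option String :=
  let steps : List (String × PySem.Set String × PySem.Set String) :=
    [(su, PySem.Set.ofList ["|", "7", "F"], PySem.Set.ofList ["|", "L", "J"]),
     (sr, PySem.Set.ofList ["-", "J", "7"], PySem.Set.ofList ["-", "L", "F"]),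
     (sd, PySem.Set.ofList ["|", "L", "J"], PySem.Set.ofList ["|", "7", "F"]),
     (sl, PySem.Set.ofList ["-", "L", "F"], PySem.Set.ofList ["-", "J", "7"])]
  let cands := steps.foldl pvStepB (PySem.Set.ofList ["|", "-", "L", "J", "7", "F", "."])
  if PySem.Set.len cands == 1 then cands.head? else none   -- none = raise AssertionError

def replacefirst_alt (grid : List (List String)) (start : Int × Int) : List (List String) :=
  let r := start.1
  let c := start.2
  match pvCell? grid (r-1) c, pvCell? grid r (c+1), pvCell? grid (r+1) c, pvCell? grid r (c-1) with
  | some su, some sr, some sd, some sl =>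
    match pvChooseB su sr sd sl with
    | some ch => pvSetCell grid r c ch
    | none => grid        -- AssertionError (excluded by Pre_)
  | _, _, _, _ => grid    -- IndexError (excluded by Pre_)

-- ===== PRECONDITION & SPEC =====

-- Pre_ excludes exactly the inputs where the Python A raises: an out-of-range
-- neighbour index (IndexError), a neighbour string that is not a MAP key
-- (KeyError), or a connection pattern matching no MAP entry (assert False).
def Pre_replacefirst (grid : List (List String)) (start : Int × Int) : Prop :=
  let r := start.1
  let c := start.2
  let keyOK : Option String → Bool := fun o =>
    o.elim false (fun s => s ∈ ["|", "-", "L", "J", "7", "F", "."])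
  let u := pvCell? grid (r-1) c
  let rt := pvCell? grid r (c+1)
  let d := pvCell? grid (r+1) c
  let l := pvCell? grid r (c-1)
  let n := u == some "|" || u == some "7" || u == some "F"
  let e := rt == some "-" || rt == some "J" || rt == some "7"
  let s := d == some "|" || d == some "L" || d == some "J"
  let w := l == some "-" || l == some "L" || l == some "F"
  keyOK u = true ∧ keyOK rt = true ∧ keyOK d = true ∧ keyOK l = true ∧
  ((n && s && !e && !w) || (e && w && !n && !s) || (n && e && !s && !w) ||
   (n && w && !s && !e) || (s && w && !n && !e) || (e && s && !n && !w) ||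
   (!n && !e && !s && !w)) = true

instance (grid : List (List String)) (start : Int × Int) : Decidable (Pre_replacefirst grid start) := by
  unfold Pre_replacefirst; infer_instance

def pvWitness_replacefirst : List (List String) × (Int × Int) :=
  ([[".", "|", "."], [".", "S", "."], [".", "|", "."]], (1, 1))

def Spec_replacefirst (grid : List (List String)) (start : Int × Int) (out : List (List String)) : Prop := out = replacefirst_alt grid start
instance (grid : List (List String)) (start : Int × Int) (out : List (List String)) : Decidable (Spec_replacefirst grid start out) := by unfold Spec_replacefirst; infer_instance

-- ===== CLAIM (what is proved, stated in full; the proofs are below) =====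
def Claim_equal_replacefirst : Prop := ∀ (grid : List (List String)) (start : Int × Int), Dom_replacefirst grid start → Pre_replacefirst grid start → Spec_replacefirst grid start (replacefirst grid start)

-- ===== LEMMAS AND PROOFS =====

-- on MAP keys, A's pure letter choice agrees with B's
theorem pvChoose_eq (su sr sd sl : String)
    (hu : su ∈ ["|", "-", "L", "J", "7", "F", "."])
    (hr : sr ∈ ["|", "-", "L", "J", "7", "F", "."])
    (hd : sd ∈ ["|", "-", "L", "J", "7", "F", "."])
    (hl : sl ∈ ["|", "-", "L", "J", "7", "F", "."]) :
    pvChooseA sr su sd sl = pvChooseB su sr sd sl := by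
  simp only [List.mem_cons, List.not_mem_nil, or_false] at hu hr hd hl
  rcases hu with rfl | rfl | rfl | rfl | rfl | rfl | rfl <;>
    rcases hr with rfl | rfl | rfl | rfl | rfl | rfl | rfl <;>
    rcases hd with rfl | rfl | rfl | rfl | rfl | rfl | rfl <;>
    rcases hl with rfl | rfl | rfl | rfl | rfl | rfl | rfl <;> decide

-- ===== VERDICT (by name: the statement is the Claim_ definition above) =====
theorem replacefirst_spec : Claim_equal_replacefirst := by
  intro grid start _ hpre
  unfold Spec_replacefirst replacefirst replacefirst_alt
  unfold Pre_replacefirst at hpre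
  obtain ⟨hu, hr, hd, hl, _⟩ := hpre
  rcases hcu : pvCell? grid (start.1 - 1) start.2 with _ | su <;> rw [hcu] at hu <;>
    [exact absurd hu (by simp); skip]
  rcases hcr : pvCell? grid start.1 (start.2 + 1) with _ | sr <;> rw [hcr] at hr <;>
    [exact absurd hr (by simp); skip]
  rcases hcd : pvCell? grid (start.1 + 1) start.2 with _ | sd <;> rw [hcd] at hd <;>
    [exact absurd hd (by simp); skip]
  rcases hcl : pvCell? grid start.1 (start.2 - 1) with _ | sl <;> rw [hcl] at hl <;>
    [exact absurd hl (by simp); skip]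
  simp only [Option.elim, decide_eq_true_eq] at hu hr hd hl
  simp only [hcu, hcr, hcd, hcl]
  rw [pvChoose_eq su sr sd sl hu hr hd hl]
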